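-- pv_equiv track=rewrite | github.com/selavy/plszip | sandbox/tools/gen_tables.py | get_length_code
-- ===== SOURCE A (Python) =====
-- def get_length_code(length):
--     table = [
--         3,
--         4,
--         5,
--         6,
--         7,
--         8,
--         9,
--         10,
--         12,
--         14,
--         16,
--         18,
--         22,
--         26,
--         30,
--         34,
--         42,
--         50,
--         58,
--         66,
--         82,
--         98,
--         114,
--         130,
--         162,
--         194,
--         226,
--         257,
--         258,
--     ]
--     for i, limit in enumerate(table):
--         if length <= limit:
--             return i + 257
--     else:
--         raise ValueError(f"Invalid length: {length}!")
-- ===== SOURCE B (Python) =====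
-- import bisect
--
-- _LENGTH_TABLE = [3, 4, 5, 6, 7, 8, 9, 10, 12, 14, 16, 18, 22, 26, 30, 34,
--                  42, 50, 58, 66, 82, 98, 114, 130, 162, 194, 226, 257, 258]
--
-- def get_length_code(length):
--     i = bisect.bisect_left(_LENGTH_TABLE, length)
--     if i == len(_LENGTH_TABLE):
--         raise ValueError(f"Invalid length: {length}!")
--     return i + 257
-- ===== Notes on version B (the rewrite author's own statement) =====
-- stated objective: idiomatic
-- what changed: Replaces the linear enumerate scan over the sorted limit table with bisect.bisect_left binary search, returning i+257 or raising the same ValueError when the insertion point equals the table length.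
import Mathlib
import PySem

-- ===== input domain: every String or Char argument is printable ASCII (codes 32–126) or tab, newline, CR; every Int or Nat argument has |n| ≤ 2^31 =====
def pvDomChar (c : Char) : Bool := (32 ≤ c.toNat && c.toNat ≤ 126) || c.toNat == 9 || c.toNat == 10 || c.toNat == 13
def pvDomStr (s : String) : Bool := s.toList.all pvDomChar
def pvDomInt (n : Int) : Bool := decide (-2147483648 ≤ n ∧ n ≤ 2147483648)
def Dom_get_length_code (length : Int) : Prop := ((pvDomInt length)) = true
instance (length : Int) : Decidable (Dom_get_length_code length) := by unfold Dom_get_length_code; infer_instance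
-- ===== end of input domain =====

-- B replaces A's linear scan of the sorted limit table by a bisect_left binary search (same table, same ValueError).

-- ===== PORT A =====
-- the table both Pythons use
def lengthTable : List Int :=
  [3, 4, 5, 6, 7, 8, 9, 10, 12, 14, 16, 18, 22, 26, 30, 34,
   42, 50, 58, 66, 82, 98, 114, 130, 162, 194, 226, 257, 258]

-- the 'for i, limit in enumerate(table)' loop; [] = the raise branch (excluded by Pre_), junk 0 there
def goA (length : Int) : List Int → Int → Int
  | [], _ => 0
  | l :: ls, i => if length ≤ l then i + 257 else goA length ls (i + 1)

def get_length_code (length : Int) : Int := goA length lengthTable 0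

-- ===== PORT B =====
-- bisect.bisect_left on lengthTable: lo=0, hi=29; while lo<hi: mid=(lo+hi)//2; if t[mid]<length: lo=mid+1 else hi=mid
-- fuel (= initial hi) only guarantees totality; hi - lo shrinks each step, so it never runs out
def bisectLeft (length : Int) : Nat → Nat → Nat → Nat
  | 0, lo, _ => lo
  | fuel + 1, lo, hi =>
    if lo < hi then
      let mid := (lo + hi) / 2
      if lengthTable.getD mid 0 < length then bisectLeft length fuel (mid + 1) hi
      else bisectLeft length fuel lo mid
    else lo

def get_length_code_alt (length : Int) : Int :=
  let i := bisectLeft length lengthTable.length 0 lengthTable.length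
  if i = lengthTable.length then 0 else (i : Int) + 257  -- i = len ⇒ raise branch, excluded by Pre_

-- ===== PRECONDITION & SPEC =====
-- Pre_ excludes exactly length > 258, where both Pythons raise ValueError("Invalid length: …!")
def Pre_get_length_code (length : Int) : Prop := length ≤ 258
instance (length : Int) : Decidable (Pre_get_length_code length) := by unfold Pre_get_length_code; infer_instance
def pvWitness_get_length_code : Int := (17)

def Spec_get_length_code (length : Int) (out : Int) : Prop := out = get_length_code_alt length
instance (length : Int) (out : Int) : Decidable (Spec_get_length_code length out) := by unfold Spec_get_length_code; infer_instance

-- ===== CLAIM (what is proved, stated in full; the proofs are below) =====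
def Claim_equal_get_length_code : Prop := ∀ (length : Int), Dom_get_length_code length → Pre_get_length_code length → Spec_get_length_code length (get_length_code length)

-- ===== LEMMAS AND PROOFS =====

-- if every in-range table entry fails the comparison, the binary search stays at lo
theorem bisectLeft_stay (length : Int) (h3 : length ≤ 3) :
    ∀ fuel lo hi, hi ≤ 29 → bisectLeft length fuel lo hi = lo := by
  intro fuel
  induction fuel with
  | zero => intro lo hi _; rfl
  | succ fuel ih =>
    intro lo hi hhi
    rw [bisectLeft]
    split
    · next hlt =>
      have hmid : (lo + hi) / 2 < 29 := by omega
      have : ¬ lengthTable.getD ((lo + hi) / 2) 0 < length := by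
        have hv : 3 ≤ lengthTable.getD ((lo + hi) / 2) 0 := by
          set m := (lo + hi) / 2 with hm
          interval_cases m <;> simp [lengthTable]
        omega
      rw [if_neg this]
      exact ih lo ((lo + hi) / 2) (by omega)
    · rfl

theorem small_case (length : Int) (h3 : length ≤ 3) :
    get_length_code length = get_length_code_alt length := by
  have hb : bisectLeft length 29 0 29 = 0 := bisectLeft_stay length h3 29 0 29 (by omega)
  simp [get_length_code, get_length_code_alt, goA, lengthTable, h3, hb]

-- ===== VERDICT (by name: the statement is the Claim_ definition above) =====
theorem get_length_code_spec : Claim_equal_get_length_code := by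
  intro length _ hpre
  unfold Spec_get_length_code
  by_cases h3 : length ≤ 3
  · exact small_case length h3
  · have h4 : 4 ≤ length := by omega
    have h258 : length ≤ 258 := hpre
    interval_cases length <;> decide
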